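-- pv_equiv track=rewrite | github.com/wntjd9805/navcim | Inference_pytorch/profile_booksim_hetero_step1.py | generate_snake_mapping
-- ===== SOURCE A (Python) =====
-- def generate_snake_mapping(node_count, network_size):
--     """
--     Generate a list of node positions in a snake-like mapping for a given node count and network size.
--
--     :param node_count: Number of nodes to map.
--     :param network_size: Tuple indicating the size of the network (rows, columns).
--     :return: List of tuples representing node positions.
--     """
--     nodes = []
--     rows, cols = network_size
--     for i in range(node_count):
--         row = i // cols
--         col = i % cols if row % 2 == 0 else (cols - 1) - (i % cols)
--         nodes.append((row, col))
--     return nodes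
-- ===== SOURCE B (Python) =====
-- def generate_snake_mapping(node_count, network_size):
--     """Row-by-row traversal: emit each grid row's columns in snake order,
--     truncating the final partial row, instead of per-index div/mod arithmetic."""
--     rows, cols = network_size
--     nodes = []
--     if node_count <= 0:
--         return nodes
--     num_rows = -(-node_count // cols)  # ceil(node_count / cols); ZeroDivisionError when cols == 0, like A
--     remaining = node_count
--     for row in range(num_rows):
--         take = min(cols, remaining)
--         order = range(cols) if row % 2 == 0 else range(cols - 1, -1, -1)
--         for col in order[:take]:
--             nodes.append((row, col))
--         remaining -= take
--     return nodes
-- ===== Notes on version B (the rewrite author's own statement) =====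
-- stated objective: alternative
-- what changed: B traverses the grid row by row (while rows remain, emit that row's columns in forward or reversed order, truncated to the remaining count) instead of computing row/col by per-index division and modulus.
-- outside the precondition, e.g. on generate_snake_mapping(3, (2, -2)): A returns [(0, 0), (-1, -2), (-1, -3)], B returns []
import Mathlib
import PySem

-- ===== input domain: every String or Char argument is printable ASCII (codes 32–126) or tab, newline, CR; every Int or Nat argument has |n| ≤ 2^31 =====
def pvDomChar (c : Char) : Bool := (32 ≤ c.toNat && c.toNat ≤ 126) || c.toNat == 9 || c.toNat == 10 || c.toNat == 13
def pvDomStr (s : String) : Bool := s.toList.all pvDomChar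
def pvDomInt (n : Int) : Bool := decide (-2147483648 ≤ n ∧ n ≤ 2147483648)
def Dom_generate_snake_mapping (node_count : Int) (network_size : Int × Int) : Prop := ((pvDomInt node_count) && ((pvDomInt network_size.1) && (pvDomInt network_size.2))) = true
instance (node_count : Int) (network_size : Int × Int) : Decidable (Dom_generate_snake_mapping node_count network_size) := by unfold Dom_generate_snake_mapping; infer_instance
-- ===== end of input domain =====

-- B traverses the grid row by row in snake order instead of per-index div/mod arithmetic (alternative decomposition, same cost).


-- ===== PORT A =====
def generate_snake_mapping (node_count : Int) (network_size : Int × Int) : List (Int × Int) :=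
  let cols := network_size.2
  (PySem.List.pyRange 0 node_count 1).foldl (fun nodes i =>
    let row := PySem.Int.floordiv i cols
    let col := if PySem.Int.mod row 2 = 0 then PySem.Int.mod i cols
               else (cols - 1) - PySem.Int.mod i cols
    nodes ++ [(row, col)]) []

-- ===== PORT B =====
def generate_snake_mapping_alt (node_count : Int) (network_size : Int × Int) : List (Int × Int) :=
  let cols := network_size.2
  if node_count ≤ 0 then []
  else
    let num_rows := -(PySem.Int.floordiv (-node_count) cols)
    ((PySem.List.pyRange 0 num_rows 1).foldl (fun (st : List (Int × Int) × Int) row =>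
      let take := min cols st.2
      let order := if PySem.Int.mod row 2 = 0 then PySem.List.pyRange 0 cols 1
                   else PySem.List.pyRange (cols - 1) (-1) (-1)
      (st.1 ++ (PySem.List.slice order none (some take)).map (fun col => (row, col)),
       st.2 - take)) ([], node_count)).1

-- ===== PRECONDITION & SPEC =====
-- Pre_ excludes cols ≤ 0 with node_count > 0: at cols == 0 A raises ZeroDivisionError; at cols < 0
-- A's negative row/column positions are artefacts of Python's floored division applied to a
-- meaningless grid width, which B's row-by-row loop does not reproduce (it returns []).
def Pre_generate_snake_mapping (node_count : Int) (network_size : Int × Int) : Prop :=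
  node_count ≤ 0 ∨ 1 ≤ network_size.2
instance (node_count : Int) (network_size : Int × Int) : Decidable (Pre_generate_snake_mapping node_count network_size) := by unfold Pre_generate_snake_mapping; infer_instance
def pvWitness_generate_snake_mapping : Int × (Int × Int) := (5, (3, 3))

def Spec_generate_snake_mapping (node_count : Int) (network_size : Int × Int) (out : List (Int × Int)) : Prop := out = generate_snake_mapping_alt node_count network_size
instance (node_count : Int) (network_size : Int × Int) (out : List (Int × Int)) : Decidable (Spec_generate_snake_mapping node_count network_size out) := by unfold Spec_generate_snake_mapping; infer_instance

-- ===== CLAIM (what is proved, stated in full; the proofs are below) =====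
def Claim_equal_generate_snake_mapping : Prop := ∀ (node_count : Int) (network_size : Int × Int), Dom_generate_snake_mapping node_count network_size → Pre_generate_snake_mapping node_count network_size → Spec_generate_snake_mapping node_count network_size (generate_snake_mapping node_count network_size)

-- ===== LEMMAS AND PROOFS =====

-- the per-index position function A applies to every i
def fSnake (cols i : Int) : Int × Int :=
  (PySem.Int.floordiv i cols,
   if PySem.Int.mod (PySem.Int.floordiv i cols) 2 = 0 then PySem.Int.mod i cols
   else (cols - 1) - PySem.Int.mod i cols)

theorem A_as_map (node_count : Int) (network_size : Int × Int) :
    generate_snake_mapping node_count network_size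
      = (PySem.List.pyRange 0 node_count 1).map (fSnake network_size.2) := by
  show List.foldl (fun acc i => acc ++ [fSnake network_size.2 i]) [] _ = _
  rw [PySem.List.foldl_append_singleton_eq_map, List.nil_append]

theorem floordiv_row_add (cols r j : Int) (hc : 1 ≤ cols) (hj0 : 0 ≤ j) (hj : j < cols) :
    PySem.Int.floordiv (r * cols + j) cols = r := by
  rw [PySem.Int.floordiv_eq_iff_of_pos (show (0:Int) < cols by omega)]
  constructor <;> nlinarith

theorem mod_row_add (cols r j : Int) (hc : 1 ≤ cols) (hj0 : 0 ≤ j) (hj : j < cols) :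
    PySem.Int.mod (r * cols + j) cols = j := by
  have h := PySem.Int.floordiv_mul_add_mod (r * cols + j) cols
  rw [floordiv_row_add cols r j hc hj0 hj] at h
  linarith

theorem block_eq (cols r : Int) (T : Nat) (hc : 1 ≤ cols) (ht : (T:Int) ≤ cols) :
    (PySem.List.slice
        (if PySem.Int.mod r 2 = 0 then PySem.List.pyRange 0 cols 1
         else PySem.List.pyRange (cols - 1) (-1) (-1)) none (some (T:Int))).map (fun col => (r, col))
      = (PySem.List.pyRange (r * cols) (r * cols + (T:Int)) 1).map (fSnake cols) := by
  have hTc : T ≤ cols.toNat := by omega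
  have hend : ((r * cols + (T:Int)) - r * cols).toNat = T := by omega
  rw [PySem.List.slice_to_natCast, PySem.List.pyRange_one (r * cols), hend, List.map_map]
  by_cases hpar : PySem.Int.mod r 2 = 0
  · rw [if_pos hpar, PySem.List.pyRange_one 0 cols, ← List.map_take, List.take_range,
      List.map_map]
    have hmin : min T (cols - 0).toNat = T := by omega
    rw [hmin]
    refine List.map_congr_left ?_
    intro k hk
    have hk' : (k : Int) < cols := by have := List.mem_range.mp hk; omega
    show (r, 0 + (k:Int)) = fSnake cols (r * cols + (k:Int))
    rw [fSnake, floordiv_row_add cols r k hc (by positivity) hk',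
      mod_row_add cols r k hc (by positivity) hk', if_pos hpar, Int.zero_add]
  · rw [if_neg hpar, PySem.List.pyRange_neg_one, ← List.map_take, List.take_range,
      List.map_map]
    have hmin : min T (cols - 1 - (-1)).toNat = T := by omega
    rw [hmin]
    refine List.map_congr_left ?_
    intro k hk
    have hk' : (k : Int) < cols := by have := List.mem_range.mp hk; omega
    show (r, cols - 1 - (k:Int)) = fSnake cols (r * cols + (k:Int))
    rw [fSnake, floordiv_row_add cols r k hc (by positivity) hk',
      mod_row_add cols r k hc (by positivity) hk', if_neg hpar]

-- loop invariant for B's row-by-row fold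
theorem B_inv (cols n : Int) (hc : 1 ≤ cols) (hn : 0 < n) :
    ∀ k : Nat, ((k:Int) - 1) * cols < n →
      (PySem.List.pyRange 0 (k:Int) 1).foldl (fun (st : List (Int × Int) × Int) row =>
          let take := min cols st.2
          let order := if PySem.Int.mod row 2 = 0 then PySem.List.pyRange 0 cols 1
                       else PySem.List.pyRange (cols - 1) (-1) (-1)
          (st.1 ++ (PySem.List.slice order none (some take)).map (fun col => (row, col)),
           st.2 - take)) ([], n)
        = ((PySem.List.pyRange 0 (min n ((k:Int) * cols)) 1).map (fSnake cols),
           n - min n ((k:Int) * cols)) := by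
  intro k
  induction k with
  | zero =>
    intro _
    have h0 : min n ((0:Int) * cols) = 0 := by omega
    simp [PySem.List.pyRange_one_eq_nil (le_refl (0:Int))]
    omega
  | succ k ih =>
    intro hk
    have hkc : (k : Int) * cols < n := by push_cast at hk; nlinarith
    have hk' : ((k:Int) - 1) * cols < n := by nlinarith
    have hrange : PySem.List.pyRange 0 ((k:Int)+1) 1
        = PySem.List.pyRange 0 (k:Int) 1 ++ [(k:Int)] :=
      PySem.List.pyRange_one_succ_right (by positivity)
    have hmink : min n ((k:Int) * cols) = (k:Int) * cols := by omega
    have hcast : ((k+1 : Nat) : Int) = (k:Int) + 1 := by push_cast; ring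
    rw [hcast, hrange, List.foldl_append, ih hk']
    simp only [List.foldl_cons, List.foldl_nil, hmink]
    obtain ⟨T, hT⟩ : ∃ T : Nat, (T:Int) = min cols (n - (k:Int) * cols) :=
      ⟨(min cols (n - (k:Int) * cols)).toNat, Int.toNat_of_nonneg (by omega)⟩
    have ht : (T:Int) ≤ cols := by omega
    rw [← hT, block_eq cols (k:Int) T hc ht]
    have hend : (k:Int) * cols + (T:Int) = min n (((k:Int) + 1) * cols) := by
      have hx : ((k:Int) + 1) * cols = (k:Int) * cols + cols := by ring
      omega
    have hsplit : PySem.List.pyRange 0 ((k:Int) * cols + (T:Int)) 1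
        = PySem.List.pyRange 0 ((k:Int) * cols) 1
          ++ PySem.List.pyRange ((k:Int) * cols) ((k:Int) * cols + (T:Int)) 1 :=
      PySem.List.pyRange_one_append 0 ((k:Int) * cols) _ (by positivity) (by omega)
    refine Prod.ext ?_ ?_
    · dsimp only
      rw [← List.map_append, ← hsplit, hend]
    · dsimp only
      rw [← hend]
      ring

-- ===== VERDICT (by name: the statement is the Claim_ definition above) =====
theorem generate_snake_mapping_spec : Claim_equal_generate_snake_mapping := by
  intro n sz _ hpre
  unfold Spec_generate_snake_mapping
  rw [A_as_map]
  by_cases hn : n ≤ 0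
  · rw [PySem.List.pyRange_one_eq_nil hn]
    simp [generate_snake_mapping_alt, hn]
  · have hc : 1 ≤ sz.2 := by
      rcases hpre with h | h
      · omega
      · exact h
    have hn' : 0 < n := by omega
    have hRspec : (-(PySem.Int.floordiv (-n) sz.2) - 1) * sz.2 < n ∧
        n ≤ -(PySem.Int.floordiv (-n) sz.2) * sz.2 :=
      (PySem.Int.neg_floordiv_neg_eq_iff_of_pos (by omega)).mp rfl
    have hR0 : 0 < -(PySem.Int.floordiv (-n) sz.2) := by nlinarith [hRspec.1, hRspec.2]
    obtain ⟨K, hK⟩ : ∃ K : Nat, (K : Int) = -(PySem.Int.floordiv (-n) sz.2) :=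
      ⟨(-(PySem.Int.floordiv (-n) sz.2)).toNat, Int.toNat_of_nonneg (by omega)⟩
    have hmin : min n ((K:Int) * sz.2) = n := by
      rw [hK]; exact min_eq_left hRspec.2
    symm
    unfold generate_snake_mapping_alt
    rw [if_neg hn]
    show ((PySem.List.pyRange 0 (-(PySem.Int.floordiv (-n) sz.2)) 1).foldl _ ([], n)).1 = _
    rw [← hK, B_inv sz.2 n hc hn' K (by rw [hK]; exact hRspec.1), hmin]
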